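-- pv_equiv track=rewrite | github.com/ICSLabOrganization/sota-fusion | test/test_unittest.py | check_deque
-- ===== SOURCE A (Python) =====
-- def check_deque(sequence_deque, start_point):
--     # Iterate through the deque starting at the given point
--     for i in range(start_point, len(sequence_deque)):
--         if sequence_deque[i] == [0, 0]:
--             # If we encounter a [0, 0] element, count it
--             count = 1
--             # Check subsequent elements until we encounter a non-zero element or reach the end of the deque
--             for j in range(i+1, len(sequence_deque)):
--                 if sequence_deque[j] == [0, 0]:
--                     count += 1
--                 else:
--                     break
--             # If we counted 5 [0, 0] elements, return True
--             if count == 5: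
--                 return True
--     # If we looped through the entire deque without finding 5 [0, 0] elements, return False
--     return False
-- ===== SOURCE B (Python) =====
-- def check_deque(sequence_deque, start_point):
--     flags = ''.join('1' if sequence_deque[i] == [0, 0] else '0'
--                     for i in range(start_point, len(sequence_deque)))
--     return '11111' in flags
-- ===== Notes on version B (the rewrite author's own statement) =====
-- stated objective: idiomatic
-- what changed: Replaces A's nested index loops with an exact-5 consecutive counter by a single pass that renders each element as a '1'/'0' flag string and does one substring search for '11111'.
import Mathlib
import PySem

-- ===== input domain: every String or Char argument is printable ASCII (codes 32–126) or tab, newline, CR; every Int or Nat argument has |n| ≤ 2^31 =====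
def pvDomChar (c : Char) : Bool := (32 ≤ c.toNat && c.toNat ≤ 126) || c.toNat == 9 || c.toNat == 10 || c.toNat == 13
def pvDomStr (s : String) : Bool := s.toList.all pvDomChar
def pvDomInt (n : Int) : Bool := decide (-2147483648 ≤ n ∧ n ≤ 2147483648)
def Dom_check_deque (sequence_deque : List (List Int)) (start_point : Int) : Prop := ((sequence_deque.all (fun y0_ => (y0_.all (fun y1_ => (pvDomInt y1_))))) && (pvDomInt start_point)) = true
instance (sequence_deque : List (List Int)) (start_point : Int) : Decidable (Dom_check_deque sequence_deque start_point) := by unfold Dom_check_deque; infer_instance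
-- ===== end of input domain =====

-- B replaces A's nested consecutive-counter scan by a single pass that builds a 0/1 flag
-- string and does one substring search for "11111" (idiomatic; return value only).

-- ===== PORT A =====
-- inner loop: for j in range(i+1, n): count += 1 on [0,0] else break
def pvInnerA (seq : List (List Int)) (js : List Int) (count : Int) : Int :=
  match js with
  | [] => count
  | j :: js' =>
    if PySem.List.pyGetD seq j [] = [0, 0] then pvInnerA seq js' (count + 1) else count

-- outer loop: for i in range(start_point, n), early return True when count == 5
def pvOuterA (seq : List (List Int)) (n : Int) (is_ : List Int) : Bool :=
  match is_ with
  | [] => false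
  | i :: is' =>
    if PySem.List.pyGetD seq i [] = [0, 0] then
      if pvInnerA seq (PySem.List.pyRange (i + 1) n 1) 1 = 5 then true
      else pvOuterA seq n is'
    else pvOuterA seq n is'

def check_deque (sequence_deque : List (List Int)) (start_point : Int) : Bool :=
  pvOuterA sequence_deque (sequence_deque.length : Int)
    (PySem.List.pyRange start_point (sequence_deque.length : Int) 1)

-- ===== PORT B =====
def check_deque_alt (sequence_deque : List (List Int)) (start_point : Int) : Bool :=
  let flags : List Char :=
    (PySem.List.pyRange start_point (sequence_deque.length : Int) 1).map
      (fun i => if PySem.List.pyGetD sequence_deque i [] = [0, 0] then '1' else '0')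
  PySem.Chars.isIn ['1', '1', '1', '1', '1'] flags

-- ===== PRECONDITION & SPEC =====
-- Pre_ excludes exactly the inputs where Python A raises IndexError
-- (start_point below -len(sequence_deque): the first index access wraps out of range).
def Pre_check_deque (sequence_deque : List (List Int)) (start_point : Int) : Prop :=
  -(sequence_deque.length : Int) ≤ start_point
instance (sequence_deque : List (List Int)) (start_point : Int) : Decidable (Pre_check_deque sequence_deque start_point) := by unfold Pre_check_deque; infer_instance

def pvWitness_check_deque : List (List Int) × Int := ([[0, 0], [1, 2]], 0)

def Spec_check_deque (sequence_deque : List (List Int)) (start_point : Int) (out : Bool) : Prop := out = check_deque_alt sequence_deque start_point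
instance (sequence_deque : List (List Int)) (start_point : Int) (out : Bool) : Decidable (Spec_check_deque sequence_deque start_point out) := by unfold Spec_check_deque; infer_instance

-- ===== CLAIM (what is proved, stated in full; the proofs are below) =====
def Claim_equal_check_deque : Prop := ∀ (sequence_deque : List (List Int)) (start_point : Int), Dom_check_deque sequence_deque start_point → Pre_check_deque sequence_deque start_point → Spec_check_deque sequence_deque start_point (check_deque sequence_deque start_point)

-- ===== LEMMAS AND PROOFS =====

-- proof-side abstractions: the boolean flag of one element, and its char rendering
def pvFlag (seq : List (List Int)) (i : Int) : Bool :=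
  decide (PySem.List.pyGetD seq i [] = [0, 0])

def pvToCh (b : Bool) : Char := if b then '1' else '0'

-- length of the leading run of `true`s
def pvLead : List Bool → Nat
  | [] => 0
  | b :: bs => if b then pvLead bs + 1 else 0

-- A's outer loop, abstracted over the flag list
def pvOuterB : List Bool → Bool
  | [] => false
  | b :: bs =>
    if b then
      if (1 + (pvLead bs : Int)) = 5 then true else pvOuterB bs
    else pvOuterB bs

theorem pvInnerA_eq (seq : List (List Int)) (js : List Int) (c : Int) :
    pvInnerA seq js c = c + (pvLead (js.map (pvFlag seq)) : Int) := by
  induction js generalizing c with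
  | nil => simp [pvInnerA, pvLead]
  | cons j js ih =>
    by_cases h : PySem.List.pyGetD seq j [] = [0, 0]
    · simp [pvInnerA, pvLead, pvFlag, h, ih]; omega
    · simp [pvInnerA, pvLead, pvFlag, h]

theorem pvOuterB_iff (L : List Bool) :
    pvOuterB L = true ↔ ∃ j, 5 ≤ pvLead (L.drop j) := by
  induction L with
  | nil => simp [pvOuterB, pvLead]
  | cons b bs ih =>
    constructor
    · intro h
      cases hb : b with
      | false =>
        simp [pvOuterB, hb] at h
        obtain ⟨j, hj⟩ := ih.mp h
        exact ⟨j + 1, by simpa using hj⟩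
      | true =>
        simp only [pvOuterB, hb] at h
        by_cases h5 : (1 + (pvLead bs : Int)) = 5
        · exact ⟨0, by simp [pvLead]; omega⟩
        · obtain ⟨j, hj⟩ := ih.mp (by simpa [h5] using h)
          exact ⟨j + 1, by simpa using hj⟩
    · rintro ⟨j, hj⟩
      cases j with
      | zero =>
        simp only [List.drop_zero, pvLead] at hj
        cases hb : b with
        | false => simp [hb] at hj
        | true =>
          rw [if_pos hb] at hj
          by_cases h5 : (1 + (pvLead bs : Int)) = 5
          · simp [pvOuterB, h5]
          · -- then 5 ≤ pvLead bs, so the run continues inside bs (drop 0)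
            have : 5 ≤ pvLead bs := by omega
            have hbs : pvOuterB bs = true := ih.mpr ⟨0, by simpa using this⟩
            simp [pvOuterB, h5, hbs]
      | succ j =>
        have hbs : pvOuterB bs = true := ih.mpr ⟨j, by simpa using hj⟩
        by_cases hb : b = true <;> simp [pvOuterB, hb, hbs]

theorem pvOuterA_eq (seq : List (List Int)) (n : Int) :
    ∀ (k : Nat) (s : Int), (n - s).toNat = k →
      pvOuterA seq n (PySem.List.pyRange s n 1) =
        pvOuterB ((PySem.List.pyRange s n 1).map (pvFlag seq)) := by
  intro k
  induction k with
  | zero =>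
    intro s hs
    rw [PySem.List.pyRange_one_eq_nil (by omega)]
    simp [pvOuterA, pvOuterB]
  | succ k ih =>
    intro s hs
    rw [PySem.List.pyRange_one_cons (by omega)]
    have htail := ih (s + 1) (by omega)
    by_cases h : PySem.List.pyGetD seq s [] = [0, 0]
    · simp only [pvOuterA, pvOuterB, List.map_cons, pvFlag, h, decide_true, if_pos,
        pvInnerA_eq, htail]
    · simp [pvOuterA, pvOuterB, pvFlag, h, htail]

-- replicate-prefix ↔ leading-run bound
theorem pvReplicate_prefix_iff (n : Nat) :
    ∀ (M : List Bool), List.replicate n true <+: M ↔ n ≤ pvLead M := by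
  induction n with
  | zero => intro M; simp
  | succ n ih =>
    intro M
    cases M with
    | nil => simp [pvLead, List.replicate_succ]
    | cons b bs =>
      rw [List.replicate_succ, List.cons_prefix_cons]
      cases hb : b <;> simp [pvLead, ih bs]

-- the '1'-pattern prefixes the rendered list iff the run of trues prefixes the bool list
theorem pvPrefix_map_iff (n : Nat) :
    ∀ (M : List Bool), List.replicate n '1' <+: M.map pvToCh ↔ List.replicate n true <+: M := by
  induction n with
  | zero => intro M; simp
  | succ n ih =>
    intro M
    cases M with
    | nil => simp [List.replicate_succ]
    | cons b bs =>
      rw [List.replicate_succ, List.replicate_succ, List.map_cons,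
        List.cons_prefix_cons, List.cons_prefix_cons]
      cases hb : b <;> simp [pvToCh, ih bs]

theorem pvIsIn_eq_outerB (M : List Bool) :
    PySem.Chars.isIn ['1', '1', '1', '1', '1'] (M.map pvToCh) = pvOuterB M := by
  have hrep : (['1', '1', '1', '1', '1'] : List Char) = List.replicate 5 '1' := rfl
  rw [Bool.eq_iff_iff, ← PySem.Chars.exists_prefix_drop_iff_isIn, pvOuterB_iff]
  exact exists_congr fun j => by
    rw [← List.map_drop, hrep, pvPrefix_map_iff, pvReplicate_prefix_iff]

-- ===== VERDICT (by name: the statement is the Claim_ definition above) =====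
theorem check_deque_spec : Claim_equal_check_deque := by
  intro seq start _ _
  unfold Spec_check_deque check_deque check_deque_alt
  rw [pvOuterA_eq seq (seq.length : Int) ((seq.length : Int) - start).toNat start rfl,
    ← pvIsIn_eq_outerB]
  congr 1
  rw [List.map_map]
  refine List.map_congr_left (fun i _ => ?_)
  by_cases h : PySem.List.pyGetD seq i [] = [0, 0] <;> simp [pvFlag, pvToCh, h]
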